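-- pv_equiv track=rewrite | github.com/kfrn/haskell-advent-of-code | 2019/04a.py | has_double
-- ===== SOURCE A (Python) =====
-- def has_double(password):
--     # Does the password contain two adjacent digits the same?
--
--     current_value = None
--
--     for letter in password:
--         if current_value == letter:
--             return True
--         else:
--             current_value = letter
--
--     return False
-- ===== SOURCE B (Python) =====
-- from itertools import groupby
--
-- def has_double(password):
--     # Collapse into maximal runs of equal consecutive characters;
--     # a double exists iff some run has length >= 2.
--     return any(sum(1 for _ in g) >= 2 for _, g in groupby(password))
-- ===== Notes on version B (the rewrite author's own statement) =====
-- stated objective: idiomatic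
-- what changed: Replaces the explicit previous-value loop with itertools.groupby: the string is collapsed into maximal runs of equal consecutive characters and the function returns whether some run has length >= 2.
import Mathlib
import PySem

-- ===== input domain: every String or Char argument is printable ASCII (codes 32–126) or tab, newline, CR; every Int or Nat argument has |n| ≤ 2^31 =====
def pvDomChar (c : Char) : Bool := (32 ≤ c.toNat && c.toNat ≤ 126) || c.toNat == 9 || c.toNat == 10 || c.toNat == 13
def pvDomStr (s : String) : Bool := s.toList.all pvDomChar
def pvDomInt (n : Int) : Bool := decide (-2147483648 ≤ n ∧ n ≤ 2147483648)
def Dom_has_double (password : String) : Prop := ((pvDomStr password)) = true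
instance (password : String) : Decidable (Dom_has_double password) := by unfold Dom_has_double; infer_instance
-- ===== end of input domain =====

-- B replaces A's previous-value loop with a groupby-style decomposition into maximal runs
-- and a run-length test (idiomatic; same O(n) cost).


-- ===== PORT A =====
-- A's loop: current_value starts as None; return True on the first letter equal to it.
def hasDoubleLoop : Option Char → List Char → Bool
  | _, [] => false
  | cur, c :: rest => if cur == some c then true else hasDoubleLoop (some c) rest

def has_double (password : String) : Bool :=
  hasDoubleLoop none password.toList

-- ===== PORT B =====
-- groupby: split into maximal runs of equal consecutive characters.
def pvRuns : List Char → List (List Char)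
  | [] => []
  | c :: rest =>
    let p := rest.span (· == c)
    (c :: p.1) :: pvRuns p.2
termination_by l => l.length
decreasing_by
  simp only [List.span_eq_takeWhile_dropWhile]
  have := List.length_dropWhile_le (p := (· == c)) (l := rest)
  simp; omega

def has_double_alt (password : String) : Bool :=
  (pvRuns password.toList).any (fun r => 2 ≤ r.length)

-- ===== PRECONDITION & SPEC =====
def Spec_has_double (password : String) (out : Bool) : Prop := out = has_double_alt password
instance (password : String) (out : Bool) : Decidable (Spec_has_double password out) := by unfold Spec_has_double; infer_instance

-- ===== CLAIM (what is proved, stated in full; the proofs are below) =====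
def Claim_equal_has_double : Prop := ∀ (password : String), Dom_has_double password → Spec_has_double password (has_double password)

-- ===== LEMMAS AND PROOFS =====

-- Both programs compute "some adjacent pair is equal".
def pvAdj : List Char → Bool
  | a :: b :: t => (a == b) || pvAdj (b :: t)
  | _ => false

theorem hasDoubleLoop_some (a : Char) (l : List Char) :
    hasDoubleLoop (some a) l = pvAdj (a :: l) := by
  induction l generalizing a with
  | nil => simp [hasDoubleLoop, pvAdj]
  | cons b t ih =>
    simp only [hasDoubleLoop, pvAdj, ih]
    by_cases h : a = b
    · simp [h]
    · simp [h]

theorem hasDoubleLoop_none (l : List Char) :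
    hasDoubleLoop none l = pvAdj l := by
  cases l with
  | nil => rfl
  | cons a t => simpa [hasDoubleLoop] using hasDoubleLoop_some a t

theorem runs_any (l : List Char) :
    (pvRuns l).any (fun r => 2 ≤ r.length) = pvAdj l := by
  induction l using pvRuns.induct with
  | case1 => simp [pvRuns, pvAdj]
  | case2 c rest p ih =>
    rw [pvRuns]
    simp only [p] at ih
    cases rest with
    | nil =>
      simp [List.span_eq_takeWhile_dropWhile, List.takeWhile, List.dropWhile, pvAdj, pvRuns]
    | cons b t =>
      by_cases h : b = c
      · have hb : (b == c) = true := by simp [h]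
        have hspan : (b :: t).span (· == c) = (b :: (t.takeWhile (· == c)), t.dropWhile (· == c)) := by
          simp [List.span_eq_takeWhile_dropWhile, List.takeWhile, List.dropWhile, hb]
        rw [hspan]
        simp [pvAdj, h]
      · have hb : (b == c) = false := by simp [h]
        have hspan : (b :: t).span (· == c) = ([], b :: t) := by
          simp [List.span_eq_takeWhile_dropWhile, List.takeWhile, List.dropWhile, hb]
        rw [hspan] at ih ⊢
        have hcb : (c == b) = false := by simp [Ne.symm h]
        simp [pvAdj, hcb, ih]

-- ===== VERDICT (by name: the statement is the Claim_ definition above) =====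
theorem has_double_spec : Claim_equal_has_double := by
  intro password _
  unfold Spec_has_double has_double has_double_alt
  rw [hasDoubleLoop_none, runs_any]
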